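-- pv_equiv track=rewrite | github.com/jacksteroo/Pepper | agent/core.py | _sanitize_untrusted_snippet
-- ===== SOURCE A (Python) =====
-- def _sanitize_untrusted_snippet(value: str, max_len: int) -> str:
--     """Neutralize third-party web text before it reaches the prompt.
--
--     Collapses newlines/tabs/control chars to spaces so a malicious snippet
--     cannot forge new prompt sections (e.g. fake "[SYSTEM]" lines), and
--     caps length so a single result cannot dominate the prompt.
--     """
--     if not value:
--         return ""
--     cleaned_chars = [
--         ch if (ch == " " or (ch.isprintable() and ch not in "\n\r\t"))
--         else " "
--         for ch in value
--     ]
--     cleaned = " ".join("".join(cleaned_chars).split())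
--     if len(cleaned) > max_len:
--         cleaned = cleaned[: max_len - 1].rstrip() + "…"
--     return cleaned
-- ===== SOURCE B (Python) =====
-- def _sanitize_untrusted_snippet(value: str, max_len: int) -> str:
--     """One streaming pass: emit kept chars, collapsing runs of dropped/space
--     chars into a single separating space; then apply the same length cap."""
--     if not value:
--         return ""
--     out = []
--     pending = False
--     for ch in value:
--         if ch != " " and ch.isprintable() and ch not in "\n\r\t":
--             if pending and out:
--                 out.append(" ")
--             out.append(ch)
--             pending = False
--         else:
--             pending = True
--     res = "".join(out)
--     if len(res) > max_len:
--         res = res[: max_len - 1].rstrip() + "…"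
--     return res
-- ===== Notes on version B (the rewrite author's own statement) =====
-- stated objective: alternative
-- what changed: Replaces A's four-pass pipeline (char-map comprehension, ''.join, .split(), ' '.join) by a single streaming pass with an output buffer and a pending-space flag that collapses separator runs as it goes; the length cap is unchanged.
import Mathlib
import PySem

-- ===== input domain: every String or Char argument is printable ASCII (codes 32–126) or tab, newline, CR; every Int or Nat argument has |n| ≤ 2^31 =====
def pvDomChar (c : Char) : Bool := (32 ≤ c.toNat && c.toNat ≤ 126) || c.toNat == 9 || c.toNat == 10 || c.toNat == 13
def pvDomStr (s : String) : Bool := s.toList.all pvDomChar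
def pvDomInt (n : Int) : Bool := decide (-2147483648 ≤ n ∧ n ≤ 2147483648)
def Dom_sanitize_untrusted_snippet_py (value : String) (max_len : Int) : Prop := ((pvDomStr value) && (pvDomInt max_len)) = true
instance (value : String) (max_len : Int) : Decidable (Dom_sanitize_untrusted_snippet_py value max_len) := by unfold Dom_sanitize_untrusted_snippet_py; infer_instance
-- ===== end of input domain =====

-- B re-does A's map/join/split/join sanitization as one streaming pass with a pending-space flag; same result, same cost (objective: alternative).

-- ===== PORT A =====
-- str.isprintable, ported by hand: exact on every Char (ASCII or not) that this file's
-- domain admits (codes 32–126 are printable, tab/LF/CR are not).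
def pyIsPrintable (c : Char) : Bool := 32 ≤ c.toNat && c.toNat ≤ 126

-- the comprehension's per-char expression: ch if (ch == " " or (ch.isprintable() and ch not in "\n\r\t")) else " "
def pvCleanA (ch : Char) : Char :=
  if ch == ' ' || (pyIsPrintable ch && !(['\n', '\r', '\t'].contains ch)) then ch else ' '

def sanitize_untrusted_snippet_py (value : String) (max_len : Int) : String :=
  if value == "" then ""
  else
    let cleaned_chars : List Char := value.toList.map pvCleanA
    let cleaned : List Char := PySem.Chars.join [' '] (PySem.Chars.split₀ cleaned_chars)
    let cleaned : List Char :=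
      if ((cleaned.length : Int) > max_len) then
        PySem.Chars.rstrip (PySem.Chars.slice cleaned none (some (max_len - 1))) ++ ['…']
      else cleaned
    String.ofList cleaned

-- ===== PORT B =====
-- loop body of B: keep the char (flushing one pending space if the buffer is non-empty),
-- or record a pending space; state = (out buffer, pending flag)
def pvBStep (st : List Char × Bool) (ch : Char) : List Char × Bool :=
  if !(ch == ' ') && pyIsPrintable ch && !(['\n', '\r', '\t'].contains ch) then
    ((if st.2 && !st.1.isEmpty then st.1 ++ [' '] else st.1) ++ [ch], false)
  else (st.1, true)

def sanitize_untrusted_snippet_py_alt (value : String) (max_len : Int) : String :=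
  if value == "" then ""
  else
    let res : List Char := (value.toList.foldl pvBStep ([], false)).1
    let res : List Char :=
      if ((res.length : Int) > max_len) then
        PySem.Chars.rstrip (PySem.Chars.slice res none (some (max_len - 1))) ++ ['…']
      else res
    String.ofList res

-- ===== PRECONDITION & SPEC =====
def Spec_sanitize_untrusted_snippet_py (value : String) (max_len : Int) (out : String) : Prop := out = sanitize_untrusted_snippet_py_alt value max_len
instance (value : String) (max_len : Int) (out : String) : Decidable (Spec_sanitize_untrusted_snippet_py value max_len out) := by unfold Spec_sanitize_untrusted_snippet_py; infer_instance

-- ===== CLAIM (what is proved, stated in full; the proofs are below) =====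
def Claim_equal_sanitize_untrusted_snippet_py : Prop := ∀ (value : String) (max_len : Int), Dom_sanitize_untrusted_snippet_py value max_len → Spec_sanitize_untrusted_snippet_py value max_len (sanitize_untrusted_snippet_py value max_len)

-- ===== LEMMAS AND PROOFS =====

-- B's keep-test, as a Bool
def pvKeep (ch : Char) : Bool := !(ch == ' ') && pyIsPrintable ch && !(['\n', '\r', '\t'].contains ch)

lemma cleanA_eq_ite (ch : Char) : pvCleanA ch = if pvKeep ch then ch else ' ' := by
  unfold pvCleanA pvKeep pyIsPrintable
  by_cases h : ch = ' ' <;> simp [h]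

lemma isspace_cleanA (ch : Char) : PySem.Chars.isspace (pvCleanA ch) = !(pvKeep ch) := by
  rw [cleanA_eq_ite]
  by_cases h : pvKeep ch = true
  · have h' := h
    unfold pvKeep pyIsPrintable at h'
    simp only [Bool.and_eq_true, Bool.not_eq_true', beq_eq_false_iff_ne, ne_eq,
      decide_eq_true_eq, List.contains_eq_mem, decide_eq_false_iff_not] at h'
    have hne : ch.toNat ≠ 32 := by
      intro hc
      exact h'.1.1 (Char.ext (UInt32.toNat_inj.mp hc))
    have hlo := h'.1.2.1
    have hhi := h'.1.2.2
    simp only [h, if_true, Bool.not_true, PySem.Chars.isspace]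
    simp only [Bool.or_eq_false_iff, Bool.and_eq_false_iff, decide_eq_false_iff_not]
    omega
  · have hf : pvKeep ch = false := by simpa using h
    simp [hf, PySem.Chars.isspace]

lemma join_cons_cons' (x y : List Char) (ys : List (List Char)) :
    PySem.Chars.join [' '] (x :: y :: ys) = x ++ ' ' :: PySem.Chars.join [' '] (y :: ys) := by
  simp [PySem.Chars.join, List.intercalate]

lemma join_snoc (ws : List (List Char)) (w : List Char) :
    PySem.Chars.join [' '] (ws ++ [w]) =
      if ws.isEmpty then w else PySem.Chars.join [' '] ws ++ ' ' :: w := by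
  induction ws with
  | nil => simp [PySem.Chars.join, List.intercalate]
  | cons x xs ih =>
    cases xs with
    | nil => simp [PySem.Chars.join, List.intercalate]
    | cons y ys =>
      rw [show ((x :: y :: ys) ++ [w] : List (List Char)) = x :: y :: (ys ++ [w]) by simp]
      rw [join_cons_cons']
      rw [show (y :: (ys ++ [w]) : List (List Char)) = (y :: ys) ++ [w] by simp]
      rw [ih, join_cons_cons']
      simp

lemma join_snoc_snoc (ws : List (List Char)) (w : List Char) (c : Char) :
    PySem.Chars.join [' '] (ws ++ [w ++ [c]]) =
      PySem.Chars.join [' '] (ws ++ [w]) ++ [c] := by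
  rw [join_snoc, join_snoc]
  by_cases h : ws.isEmpty <;> simp [h]

lemma join_ne_nil (ws : List (List Char)) (hne : ws ≠ []) (hw : ∀ w ∈ ws, w ≠ []) :
    PySem.Chars.join [' '] ws ≠ [] := by
  cases ws with
  | nil => exact absurd rfl hne
  | cons x xs =>
    cases xs with
    | nil =>
      simpa [PySem.Chars.join, List.intercalate] using hw x (by simp)
    | cons y ys =>
      have hx := hw x (by simp)
      have : PySem.Chars.join [' '] (x :: y :: ys) =
          x ++ ' ' :: PySem.Chars.join [' '] (y :: ys) := by
        simp [PySem.Chars.join, List.intercalate]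
      rw [this]
      simp [hx]

-- the streaming invariant: B's fold state (out, pending) tracks split₀.go's (cur, acc)
lemma fold_eq_go (cs : List Char) :
    ∀ (out cur : List Char) (acc : List (List Char)) (pending : Bool),
    out = PySem.Chars.join [' '] (acc.reverse ++ if cur.isEmpty then [] else [cur.reverse]) →
    (pending = true → cur = []) →
    (pending = false → cur = [] → acc = []) →
    (∀ w ∈ acc, w ≠ []) →
    (cs.foldl pvBStep (out, pending)).1 =
      PySem.Chars.join [' '] (PySem.Chars.split₀.go (cs.map pvCleanA) cur acc) := by
  induction cs with
  | nil =>
    intro out cur acc pending h1 _ _ _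
    simp only [List.foldl_nil, List.map_nil, PySem.Chars.split₀.go]
    by_cases hc : cur.isEmpty <;> simp_all
  | cons c cs ih =>
    intro out cur acc pending h1 h2 h3 h4
    simp only [List.map_cons, List.foldl_cons, PySem.Chars.split₀.go, isspace_cleanA]
    show ((cs.foldl pvBStep (pvBStep (out, pending) c))).1 = _
    by_cases hk : pvKeep c = true
    · -- c is kept: go extends cur with pvCleanA c = c, B emits (maybe a space and) c
      have hcl : pvCleanA c = c := by rw [cleanA_eq_ite, hk]; rfl
      simp only [hk, Bool.not_true, Bool.false_eq_true, if_false, hcl]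
      have hstep : pvBStep (out, pending) c =
          ((if pending && !out.isEmpty then out ++ [' '] else out) ++ [c], false) := by
        have hk2 : (!(c == ' ') && pyIsPrintable c && !(['\n', '\r', '\t'].contains c)) = true := hk
        unfold pvBStep
        rw [if_pos hk2]
      rw [hstep]
      apply ih
      · -- new out = join of acc.reverse ++ [(c :: cur).reverse]
        by_cases hcur : cur = []
        · subst hcur
          simp only [List.isEmpty_nil, if_pos, List.append_nil] at h1
          by_cases hacc : acc = []
          · subst hacc
            simp [h1, PySem.Chars.join, List.intercalate]
          · have hp : pending = true := by
              cases pending with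
              | false => exact absurd (h3 rfl rfl) hacc
              | true => rfl
            have hout : out ≠ [] := by
              rw [h1]
              exact join_ne_nil _ (by simpa using hacc) (by
                intro w hw; exact h4 w (by simpa using hw))
            simp only [hp, Bool.true_and, List.isEmpty_eq_false_iff .. |>.mpr hout,
              Bool.not_false, if_pos]
            simp only [List.reverse_cons, List.reverse_nil, List.nil_append,
              List.isEmpty_cons, if_neg (by simp : ¬((false : Bool) = true))]
            rw [h1, join_snoc acc.reverse [c]]
            simp [hacc]
        · have hp : pending = false := by
            cases pending with
            | true => exact absurd (h2 rfl) hcur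
            | false => rfl
          simp only [hp, Bool.false_and, if_neg (by simp : ¬((false : Bool) = true))]
          simp only [List.isEmpty_eq_false_iff .. |>.mpr hcur, List.reverse_cons,
            List.isEmpty_cons, if_neg (by simp : ¬((false : Bool) = true))] at h1 ⊢
          rw [h1, join_snoc_snoc]
      · simp
      · intro _ h; simp at h
      · exact h4
    · -- c collapses to a space: go closes the current word, B just sets pending
      have : (!pvKeep c) = true := by simp [hk]
      simp only [this, if_pos]
      have hstep : pvBStep (out, pending) c = (out, true) := by
        have hk2 : (!(c == ' ') && pyIsPrintable c && !(['\n', '\r', '\t'].contains c)) = false :=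
          Bool.eq_false_iff.mpr hk
        unfold pvBStep
        rw [if_neg (ne_true_of_eq_false hk2)]
      rw [hstep]
      by_cases hcur : cur.isEmpty
      · simp only [hcur, if_pos]
        apply ih
        · simpa [hcur] using h1
        · intro _; rfl
        · intro h; simp at h
        · exact h4
      · simp only [hcur, Bool.false_eq_true, if_false]
        apply ih
        · simp only [hcur, Bool.false_eq_true, if_false] at h1
          simp [h1]
        · intro _; rfl
        · intro h; simp at h
        · intro w hw
          rcases List.mem_cons.mp hw with h | h
          · subst h
            simpa using (by simpa using hcur : ¬ cur = [])
          · exact h4 w h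
  

theorem sanitize_untrusted_snippet_py_spec_aux (value : String) (max_len : Int) :
    sanitize_untrusted_snippet_py value max_len = sanitize_untrusted_snippet_py_alt value max_len := by
  unfold sanitize_untrusted_snippet_py sanitize_untrusted_snippet_py_alt
  by_cases hv : value == ""
  · simp [hv]
  · simp only [hv, Bool.false_eq_true, if_false]
    have key : (value.toList.foldl pvBStep ([], false)).1 =
        PySem.Chars.join [' '] (PySem.Chars.split₀ (value.toList.map pvCleanA)) := by
      rw [PySem.Chars.split₀]
      exact fold_eq_go value.toList [] [] [] false (by simp [PySem.Chars.join, List.intercalate])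
        (by intro h; rfl) (by intro _ _; rfl) (by intro w hw; simp at hw)
    rw [key]

-- ===== VERDICT (by name: the statement is the Claim_ definition above) =====
theorem sanitize_untrusted_snippet_py_spec : Claim_equal_sanitize_untrusted_snippet_py := by
  intro value max_len _
  unfold Spec_sanitize_untrusted_snippet_py
  exact sanitize_untrusted_snippet_py_spec_aux value max_len
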